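-- pv_equiv track=rewrite | github.com/shellydeforte/deconstruct_lc | deconstruct_lc/old/puncta/puncta_scores.py | bin_scores
-- ===== SOURCE A (Python) =====
-- def bin_scores(scores):
--     bins = [0, 0, 0]
--     for score in scores:
--         if score <= 0:
--             bins[0] += 1
--         elif 20 >= score > 0:
--             bins[1] += 1
--         else:
--             bins[2] += 1
--     return bins
-- ===== SOURCE B (Python) =====
-- def _bisect_right(a, x):
--     lo, hi = 0, len(a)
--     while lo < hi:
--         mid = (lo + hi) // 2
--         if x < a[mid]:
--             hi = mid
--         else:
--             lo = mid + 1
--     return lo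
--
--
-- def bin_scores(scores):
--     s = sorted(scores)
--     n = len(s)
--     c0 = _bisect_right(s, 0)
--     c1 = _bisect_right(s, 20)
--     return [c0, c1 - c0, n - c1]
-- ===== Notes on version B (the rewrite author's own statement) =====
-- stated objective: alternative
-- what changed: Replaces the single bucketing scan that increments one of three counters per element with sort-then-binary-search: sort the scores and locate the two cut points 0 and 20 with a hand-written bisect_right, returning [c0, c1-c0, n-c1].
import Mathlib
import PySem

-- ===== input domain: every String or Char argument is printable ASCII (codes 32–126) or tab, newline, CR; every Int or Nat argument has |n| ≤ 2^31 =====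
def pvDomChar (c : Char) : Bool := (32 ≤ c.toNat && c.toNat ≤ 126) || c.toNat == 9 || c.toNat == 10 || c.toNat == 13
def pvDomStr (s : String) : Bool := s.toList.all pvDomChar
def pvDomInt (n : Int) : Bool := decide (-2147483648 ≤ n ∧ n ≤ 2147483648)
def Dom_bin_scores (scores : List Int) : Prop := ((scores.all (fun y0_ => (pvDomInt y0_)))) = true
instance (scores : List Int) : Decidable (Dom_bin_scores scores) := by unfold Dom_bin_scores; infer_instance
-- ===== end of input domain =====

-- B replaces A's single bucketing scan with sort-then-binary-search over the cut points 0 and 20 (alternative algorithm, not claimed faster).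


-- ===== PORT A =====
-- one iteration of A's for-loop: bump the chosen bin of the 3-element list
def binStep (b : List Int) (score : Int) : List Int :=
  if score ≤ 0 then b.set 0 (b.getD 0 0 + 1)
  else if 20 ≥ score ∧ score > 0 then b.set 1 (b.getD 1 0 + 1)
  else b.set 2 (b.getD 2 0 + 1)

def bin_scores (scores : List Int) : List Int :=
  scores.foldl binStep [0, 0, 0]

-- ===== PORT B =====
-- transliteration of Source B's hand-written _bisect_right loop (a[mid] is always in range since hi ≤ len a)
def bisectRightAux (a : List Int) (x : Int) (lo hi : Nat) : Nat :=
  if lo < hi then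
    let mid := (lo + hi) / 2
    if x < a.getD mid 0 then bisectRightAux a x lo mid
    else bisectRightAux a x (mid + 1) hi
  else lo
termination_by hi - lo
decreasing_by all_goals omega

def bin_scores_alt (scores : List Int) : List Int :=
  let s := PySem.List.sorted scores (fun x => x)
  let n := s.length
  let c0 := bisectRightAux s 0 0 n
  let c1 := bisectRightAux s 20 0 n
  [(c0 : Int), (c1 : Int) - (c0 : Int), (n : Int) - (c1 : Int)]

-- ===== PRECONDITION & SPEC =====
def Spec_bin_scores (scores : List Int) (out : List Int) : Prop := out = bin_scores_alt scores
instance (scores : List Int) (out : List Int) : Decidable (Spec_bin_scores scores out) := by unfold Spec_bin_scores; infer_instance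

-- ===== CLAIM (what is proved, stated in full; the proofs are below) =====
def Claim_equal_bin_scores : Prop := ∀ (scores : List Int), Dom_bin_scores scores → Spec_bin_scores scores (bin_scores scores)

-- ===== LEMMAS AND PROOFS =====

-- under the "all ≤ x before k, all > x from k on" split, countP (· ≤ x) is exactly k
theorem countP_split (s : List Int) (x : Int) (k : Nat) (hk : k ≤ s.length)
    (h1 : ∀ j (hj : j < s.length), j < k → s[j] ≤ x)
    (h2 : ∀ j (hj : j < s.length), k ≤ j → x < s[j]) :
    s.countP (fun a => decide (a ≤ x)) = k := by
  have hsplit : s = s.take k ++ s.drop k := (List.take_append_drop k s).symm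
  rw [hsplit, List.countP_append]
  have htake : (s.take k).countP (fun a => decide (a ≤ x)) = k := by
    rw [List.countP_eq_length.mpr, List.length_take]
    · omega
    · intro a ha
      obtain ⟨i, hi, rfl⟩ := List.mem_iff_getElem.1 ha
      have hlen : (s.take k).length = k := by rw [List.length_take]; omega
      have : (s.take k)[i] = s[i]'(by omega) := List.getElem_take
      rw [this]
      exact decide_eq_true (h1 i (by omega) (by omega))
  have hdrop : (s.drop k).countP (fun a => decide (a ≤ x)) = 0 := by
    rw [List.countP_eq_zero]
    intro a ha
    obtain ⟨i, hi, rfl⟩ := List.mem_iff_getElem.1 ha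
    have hlen : (s.drop k).length = s.length - k := List.length_drop
    have : (s.drop k)[i] = s[k + i]'(by omega) := List.getElem_drop
    rw [this]
    simp only [decide_eq_true_eq]
    have := h2 (k + i) (by omega) (by omega)
    omega
  omega

-- the binary-search loop returns the boundary position on a sorted segment
theorem bisectRightAux_spec (s : List Int) (x : Int) (hs : s.Pairwise (· ≤ ·)) :
    ∀ n lo hi, hi - lo = n → lo ≤ hi → hi ≤ s.length →
    (∀ j (hj : j < s.length), j < lo → s[j] ≤ x) →
    (∀ j (hj : j < s.length), hi ≤ j → x < s[j]) →
    bisectRightAux s x lo hi = s.countP (fun a => decide (a ≤ x)) := by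
  have hmono : ∀ i j (hi : i < s.length) (hj : j < s.length), i ≤ j → s[i] ≤ s[j] := by
    intro i j hi hj hij
    rcases Nat.lt_or_ge i j with h | h
    · exact List.pairwise_iff_getElem.1 hs i j hi hj h
    · have : i = j := by omega
      subst this; exact le_refl _
  intro n
  induction n using Nat.strong_induction_on with
  | _ d ih =>
    intro lo hi hd hlohi hhile hbelow habove
    rw [bisectRightAux]
    by_cases hlt : lo < hi
    · simp only [if_pos hlt]
      set mid := (lo + hi) / 2 with hmid
      have hmlt : mid < s.length := by omega
      have hget : s.getD mid 0 = s[mid] := List.getD_eq_getElem s 0 hmlt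
      by_cases hx : x < s.getD mid 0
      · simp only [if_pos hx]
        rw [hget] at hx
        refine ih (mid - lo) (by omega) lo mid rfl (by omega) (by omega) hbelow ?_
        intro j hj hmj
        rcases Nat.lt_or_ge j hi with h | h
        · exact lt_of_lt_of_le hx (hmono mid j hmlt hj hmj)
        · exact habove j hj h
      · simp only [if_neg hx]
        rw [hget] at hx
        rw [not_lt] at hx
        refine ih (hi - (mid + 1)) (by omega) (mid + 1) hi rfl (by omega) hhile ?_ habove
        intro j hj hjm
        exact le_trans (hmono j mid hj hmlt (by omega)) hx
    · simp only [if_neg hlt]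
      have heq : lo = hi := by omega
      subst heq
      exact (countP_split s x lo hhile hbelow (fun j hj h => habove j hj h)).symm

-- bisect over the whole sorted list counts the elements ≤ x
theorem bisect_count (l : List Int) (x : Int) :
    bisectRightAux (PySem.List.sorted l (fun y => y)) x 0
        (PySem.List.sorted l (fun y => y)).length
      = l.countP (fun a => decide (a ≤ x)) := by
  have hp := PySem.List.sorted_pairwise l (fun y => y)
  rw [bisectRightAux_spec _ x hp _ 0 _ rfl (Nat.zero_le _) (le_refl _)
      (fun j hj h => by omega) (fun j hj h => by omega)]
  exact (PySem.List.sorted_perm l (fun y => y) false).countP_eq _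

-- A's fold, with general starting counters
theorem foldA (l : List Int) (a b c : Int) :
    l.foldl binStep [a, b, c] =
      [a + (l.countP (fun y => decide (y ≤ 0)) : Int),
       b + (l.countP (fun y => decide (0 < y ∧ y ≤ 20)) : Int),
       c + (l.countP (fun y => decide (20 < y)) : Int)] := by
  induction l generalizing a b c with
  | nil => simp
  | cons s t ihc =>
    simp only [List.foldl_cons, List.countP_cons, binStep]
    by_cases h0 : s ≤ 0
    · rw [if_pos h0]
      simp only [List.set, List.getD, List.getElem?_cons_zero, Option.getD_some, ihc]
      have e0 : decide (s ≤ 0) = true := decide_eq_true h0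
      have e1 : decide (0 < s ∧ s ≤ 20) = false := by simp; omega
      have e2 : decide (20 < s) = false := by simp; omega
      rw [e0, e1, e2]
      norm_num
      omega
    · rw [if_neg h0]
      by_cases h1 : 20 ≥ s ∧ s > 0
      · rw [if_pos h1]
        simp only [List.set, List.getD, List.getElem?_cons_succ, List.getElem?_cons_zero,
          Option.getD_some, ihc]
        have e0 : decide (s ≤ 0) = false := by simp; omega
        have e1 : decide (0 < s ∧ s ≤ 20) = true := by simp; omega
        have e2 : decide (20 < s) = false := by simp; omega
        rw [e0, e1, e2]
        norm_num
        omega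
      · rw [if_neg h1]
        simp only [List.set, List.getD, List.getElem?_cons_succ, List.getElem?_cons_zero,
          Option.getD_some, ihc]
        have e0 : decide (s ≤ 0) = false := by simp; omega
        have e1 : decide (0 < s ∧ s ≤ 20) = false := by simp; omega
        have e2 : decide (20 < s) = true := by simp; omega
        rw [e0, e1, e2]
        norm_num
        omega

-- ≤ 20 counts split as ≤ 0 plus the middle band
theorem count_sum (l : List Int) :
    l.countP (fun a => decide (a ≤ 20)) =
      l.countP (fun a => decide (a ≤ 0)) + l.countP (fun a => decide (0 < a ∧ a ≤ 20)) := by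
  induction l with
  | nil => simp
  | cons s t ih =>
    simp only [List.countP_cons, ih]
    by_cases h : s ≤ 0
    · have e0 : decide (s ≤ 0) = true := decide_eq_true h
      have e20 : decide (s ≤ 20) = true := by simp; omega
      have e1 : decide (0 < s ∧ s ≤ 20) = false := by simp; omega
      rw [e0, e20, e1]; norm_num; try omega
    · by_cases h2 : s ≤ 20
      · have e0 : decide (s ≤ 0) = false := by simp; omega
        have e20 : decide (s ≤ 20) = true := decide_eq_true h2
        have e1 : decide (0 < s ∧ s ≤ 20) = true := by simp; omega
        rw [e0, e20, e1]; norm_num; try omega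
      · have e0 : decide (s ≤ 0) = false := by simp; omega
        have e20 : decide (s ≤ 20) = false := by simp; omega
        have e1 : decide (0 < s ∧ s ≤ 20) = false := by simp; omega
        rw [e0, e20, e1]; norm_num; try omega

-- the whole list splits as ≤ 20 plus > 20
theorem count_len (l : List Int) :
    l.length = l.countP (fun a => decide (a ≤ 20)) + l.countP (fun a => decide (20 < a)) := by
  induction l with
  | nil => simp
  | cons s t ih =>
    simp only [List.countP_cons, List.length_cons, ih]
    by_cases h : s ≤ 20
    · have e20 : decide (s ≤ 20) = true := decide_eq_true h
      have eg : decide (20 < s) = false := by simp; omega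
      rw [e20, eg]; norm_num; try omega
    · have e20 : decide (s ≤ 20) = false := by simp; omega
      have eg : decide (20 < s) = true := by simp; omega
      rw [e20, eg]; norm_num; try omega

-- ===== VERDICT (by name: the statement is the Claim_ definition above) =====
theorem bin_scores_spec : Claim_equal_bin_scores := by
  intro scores _
  show bin_scores scores = bin_scores_alt scores
  unfold bin_scores
  rw [foldA]
  have halt : bin_scores_alt scores =
      [((bisectRightAux (PySem.List.sorted scores (fun x => x)) 0 0
          (PySem.List.sorted scores (fun x => x)).length : Nat) : Int),
       ((bisectRightAux (PySem.List.sorted scores (fun x => x)) 20 0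
          (PySem.List.sorted scores (fun x => x)).length : Nat) : Int) -
       ((bisectRightAux (PySem.List.sorted scores (fun x => x)) 0 0
          (PySem.List.sorted scores (fun x => x)).length : Nat) : Int),
       (((PySem.List.sorted scores (fun x => x)).length : Nat) : Int) -
       ((bisectRightAux (PySem.List.sorted scores (fun x => x)) 20 0
          (PySem.List.sorted scores (fun x => x)).length : Nat) : Int)] := rfl
  rw [halt]
  rw [bisect_count scores 0, bisect_count scores 20]
  rw [(PySem.List.sorted_perm scores (fun y => y) false).length_eq]
  rw [count_sum scores, count_len scores, count_sum scores]
  push_cast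
  simp only [List.cons.injEq, and_true]
  refine ⟨by ring, by ring, by ring⟩
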